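-- pv_equiv track=rewrite | github.com/Pavanshettikera/C-- | .py | recursive_delete
-- ===== SOURCE A (Python) =====
-- def recursive_delete(s):
--     if len(s)<=1:
--         return s
--     i=1
--     while i<len(s) and s[i]==s[i-1]:
--         i+=1
--     if i==1:
--         return s[i]+recursive_delete(s[1:])
--     else:
--         return recursive_delete(s[0])
-- ===== SOURCE B (Python) =====
-- def recursive_delete(s):
--     result = []
--     cur = s
--     while len(cur) > 1:
--         if cur[0] == cur[1]:
--             result.append(cur[0])
--             break
--         result.append(cur[1])
--         cur = cur[1:]
--     else:
--         result.append(cur)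
--     return ''.join(result)
-- ===== Notes on version B (the rewrite author's own statement) =====
-- stated objective: simpler
-- what changed: Replaces A's recursion (one Python stack frame and a string slice per character) and its redundant run-length while-loop with a single iterative cursor loop that only compares the first two characters and accumulates output pieces in a list joined once.
import Mathlib
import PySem

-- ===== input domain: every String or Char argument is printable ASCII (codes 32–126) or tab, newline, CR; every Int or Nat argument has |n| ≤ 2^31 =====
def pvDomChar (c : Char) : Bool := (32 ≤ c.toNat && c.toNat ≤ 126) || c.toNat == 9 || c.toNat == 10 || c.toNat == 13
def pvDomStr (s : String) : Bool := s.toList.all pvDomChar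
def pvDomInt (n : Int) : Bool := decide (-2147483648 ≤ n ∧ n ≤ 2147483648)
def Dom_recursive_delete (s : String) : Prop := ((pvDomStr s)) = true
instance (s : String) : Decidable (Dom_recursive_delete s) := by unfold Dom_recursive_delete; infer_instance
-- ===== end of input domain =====

-- B replaces A's recursion and its redundant run-length scan with one iterative
-- cursor loop accumulating the output (objective: simpler); return values agree on all inputs.

-- ===== PORT A =====
-- the while loop 'i=1; while i<len(s) and s[i]==s[i-1]: i+=1'
def pvRunIdx (s : List Char) (i : Nat) : Nat :=
  if i < s.length ∧ s.getD i ' ' = s.getD (i-1) ' ' then pvRunIdx s (i+1) else i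
termination_by s.length - i
decreasing_by omega

def pvRdA (s : List Char) : List Char :=
  if s.length ≤ 1 then s
  else
    let i := pvRunIdx s 1
    if i = 1 then s.getD i ' ' :: pvRdA (s.drop 1)
    else pvRdA (s.take 1)
termination_by s.length
decreasing_by all_goals (simp_all; try omega)

def recursive_delete (s : String) : String := String.mk (pvRdA s.toList)

-- ===== PORT B =====
-- 'result=[]; cur=s; while len(cur)>1: if cur[0]==cur[1]: result.append(cur[0]); break
--  result.append(cur[1]); cur=cur[1:]  else: result.append(cur); return "".join(result)'
def pvRdB (result cur : List Char) : List Char :=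
  match cur with
  | [] => result
  | [c] => result ++ [c]
  | a :: b :: rest =>
      if a = b then result ++ [a]
      else pvRdB (result ++ [b]) (b :: rest)

def recursive_delete_alt (s : String) : String := String.mk (pvRdB [] s.toList)

-- ===== PRECONDITION & SPEC =====
def Spec_recursive_delete (s : String) (out : String) : Prop := out = recursive_delete_alt s
instance (s : String) (out : String) : Decidable (Spec_recursive_delete s out) := by unfold Spec_recursive_delete; infer_instance

-- ===== CLAIM (what is proved, stated in full; the proofs are below) =====
def Claim_equal_recursive_delete : Prop := ∀ (s : String), Dom_recursive_delete s → Spec_recursive_delete s (recursive_delete s)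

-- ===== LEMMAS AND PROOFS =====
theorem pvRunIdx_ge (s : List Char) (i : Nat) : i ≤ pvRunIdx s i := by
  unfold pvRunIdx
  split
  · have := pvRunIdx_ge s (i+1); omega
  · exact le_refl _
termination_by s.length - i
decreasing_by omega

theorem pvRdA_eq (a b : Char) (rest : List Char) (h : a ≠ b) :
    pvRdA (a :: b :: rest) = b :: pvRdA (b :: rest) := by
  rw [pvRdA]
  have h1 : pvRunIdx (a :: b :: rest) 1 = 1 := by
    rw [pvRunIdx]
    simp only [List.length_cons, List.getD]
    rw [if_neg]
    simp
    intro hba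
    exact absurd hba.symm h
  simp [h1]

theorem pvRdA_run (a : Char) (rest : List Char) :
    pvRdA (a :: a :: rest) = [a] := by
  rw [pvRdA]
  have h1 : pvRunIdx (a :: a :: rest) 1 ≠ 1 := by
    rw [pvRunIdx]
    rw [if_pos (by constructor <;> simp)]
    have := pvRunIdx_ge (a :: a :: rest) (1+1)
    omega
  simp only [List.length_cons]
  rw [if_neg (by omega), if_neg h1]
  rw [pvRdA]
  simp

theorem pvRdB_eq_pvRdA (cur : List Char) : ∀ result, pvRdB result cur = result ++ pvRdA cur := by
  induction cur with
  | nil => intro result; simp [pvRdB, pvRdA]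
  | cons a t ih =>
    intro result
    match t with
    | [] => simp [pvRdB, pvRdA]
    | b :: rest =>
      by_cases h : a = b
      · subst h
        rw [pvRdB, pvRdA_run]
        simp
      · rw [pvRdB, pvRdA_eq a b rest h]
        simp [h, ih]

-- ===== VERDICT (by name: the statement is the Claim_ definition above) =====
theorem recursive_delete_spec : Claim_equal_recursive_delete := by
  intro s _
  unfold Spec_recursive_delete recursive_delete recursive_delete_alt
  rw [pvRdB_eq_pvRdA]
  simp
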